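-- pv_equiv track=rewrite | github.com/kaladin24as/NewHope | DataEng/backend/core/env_manager.py | _format_env
-- ===== SOURCE A (Python) =====
-- from typing import Dict, Optional, List
--
-- def _format_env(vars_dict: Dict[str, str], header: Optional[List[str]] = None) -> str:
--     """
--     Format environment variables as KEY=VALUE lines.
--
--     Args:
--         vars_dict: Dictionary of environment variables
--         header: Optional header comments
--
--     Returns:
--         Formatted .env file content
--     """
--     lines = []
--
--     # Add header if provided
--     if header:
--         lines.extend(header)
--
--     # Group variables by prefix for better organization
--     grouped = {}
--     for key, value in sorted(vars_dict.items()):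
--         prefix = key.split("_")[0] if "_" in key else "OTHER"
--         if prefix not in grouped:
--             grouped[prefix] = []
--         grouped[prefix].append((key, value))
--
--     # Write groups with separators
--     for group_name, group_vars in sorted(grouped.items()):
--         if group_name != "OTHER":
--             lines.append(f"# {group_name.title()} Configuration")
--             lines.append("")
--
--         for key, value in group_vars:
--             # Handle multi-line values
--             if "\n" in str(value):
--                 value = value.replace("\n", "\\n")
--
--             lines.append(f"{key}={value}")
--
--         lines.append("")  # Blank line between groups
--
--     return "\n".join(lines)
-- ===== SOURCE B (Python) =====
-- from typing import Dict, Optional, List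
--
--
-- def _format_env(vars_dict: Dict[str, str], header: Optional[List[str]] = None) -> str:
--     """Format environment variables as KEY=VALUE lines, grouped by key prefix."""
--
--     def prefix(key: str) -> str:
--         return key.split("_")[0] if "_" in key else "OTHER"
--
--     lines = list(header) if header else []
--     prev = None
--     for key, value in sorted(vars_dict.items(), key=lambda kv: (prefix(kv[0]), kv[0])):
--         p = prefix(key)
--         if p != prev:
--             if prev is not None:
--                 lines.append("")  # blank line closing the previous group
--             if p != "OTHER":
--                 lines.append(f"# {p.title()} Configuration")
--                 lines.append("")
--             prev = p
--         lines.append(f"{key}={value.replace(chr(10), chr(92) + 'n')}")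
--     if prev is not None:
--         lines.append("")
--     return "\n".join(lines)
-- ===== Notes on version B (the rewrite author's own statement) =====
-- stated objective: alternative
-- what changed: Replaces the grouping dict plus double sort (sort items, group into a dict, sort the group list) and nested output loops with one composite sort by (prefix, key) followed by a single pass that detects group boundaries with a previous-prefix variable.
import Mathlib
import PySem

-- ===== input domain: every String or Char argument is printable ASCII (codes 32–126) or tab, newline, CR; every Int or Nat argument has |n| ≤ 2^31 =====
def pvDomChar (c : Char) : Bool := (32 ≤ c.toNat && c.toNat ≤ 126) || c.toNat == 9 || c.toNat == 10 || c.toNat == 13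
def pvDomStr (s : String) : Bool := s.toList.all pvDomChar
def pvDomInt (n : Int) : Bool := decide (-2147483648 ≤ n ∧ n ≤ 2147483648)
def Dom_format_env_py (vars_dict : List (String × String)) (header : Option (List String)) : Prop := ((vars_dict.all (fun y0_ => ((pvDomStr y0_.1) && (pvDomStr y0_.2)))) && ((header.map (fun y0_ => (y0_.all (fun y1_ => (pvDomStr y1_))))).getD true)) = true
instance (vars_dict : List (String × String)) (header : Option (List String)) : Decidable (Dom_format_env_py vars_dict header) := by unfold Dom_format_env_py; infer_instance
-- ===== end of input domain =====

-- B replaces A's grouping dict + double sort + nested output loops by one composite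
-- (prefix, key) sort and a single pass with a previous-prefix variable (objective: alternative).

-- ===== PORT A =====
-- str.title(), shared builtin helper (exact on ASCII: a letter is uppercased after a
-- non-letter and lowercased after a letter; other characters unchanged)
def pyTitleGo : List Char → Bool → List Char
  | [], _ => []
  | c :: t, prevAlpha =>
    (if PySem.Chars.isalpha c then
        (if prevAlpha then PySem.Chars.lowerChar c else PySem.Chars.upperChar c)
      else c) :: pyTitleGo t (PySem.Chars.isalpha c)

def format_env_py (vars_dict : List (String × String)) (header : Option (List String)) : String :=
  -- lines = []; if header: lines.extend(header)
  let lines : List String :=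
    match header with
    | some h => if h.isEmpty then [] else h
    | none => []
  -- the dict parameter (duplicate keys collapse as in Python, last value wins, first position kept)
  let d : PySem.Dict String String := PySem.Dict.ofList vars_dict
  -- grouped = {}; for key, value in sorted(vars_dict.items()): …
  -- (dict keys are unique, so Python's tuple sort of items is decided by the key alone — exact)
  let grouped : PySem.Dict String (List (String × String)) :=
    (PySem.List.sorted d.items (fun kv => kv.1)).foldl
      (fun grouped kv =>
        let p := if PySem.Str.isIn "_" kv.1 then ((PySem.Str.split? kv.1 "_").getD []).headD "" else "OTHER"
        let grouped := if grouped.contains p then grouped else grouped.insert p []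
        grouped.modify p [] (fun l => l ++ [kv]))
      PySem.Dict.empty
  -- for group_name, group_vars in sorted(grouped.items()): …  (group names unique: sort by name)
  let lines := (PySem.List.sorted grouped.items (fun g => g.1)).foldl
    (fun lines g =>
      let lines := if g.1 ≠ "OTHER" then
          lines ++ [String.ofList ('#' :: ' ' :: (pyTitleGo g.1.toList false ++ " Configuration".toList))] ++ [""]
        else lines
      let lines := g.2.foldl
        (fun lines kv =>
          let v := if PySem.Str.isIn "\n" kv.2 then PySem.Str.replace kv.2 "\n" "\\n" else kv.2
          lines ++ [String.ofList (kv.1.toList ++ '=' :: v.toList)]) lines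
      lines ++ [""]) lines
  PySem.Str.join "\n" lines

-- ===== PORT B =====
def pyPrefix (key : String) : String :=
  if PySem.Str.isIn "_" key then ((PySem.Str.split? key "_").getD []).headD "" else "OTHER"

def format_env_py_alt (vars_dict : List (String × String)) (header : Option (List String)) : String :=
  -- lines = list(header) if header else []
  let lines0 : List String :=
    match header with
    | some h => if h.isEmpty then [] else h
    | none => []
  let d : PySem.Dict String String := PySem.Dict.ofList vars_dict
  -- one composite sort, then a single pass with the previous prefix in the state
  let st := (PySem.List.sorted2 d.items (fun kv => pyPrefix kv.1) (fun kv => kv.1)).foldl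
    (fun (st : List String × Option String) kv =>
      let p := pyPrefix kv.1
      let lines :=
        if some p ≠ st.2 then
          (if st.2.isSome then st.1 ++ [""] else st.1) ++
          (if p ≠ "OTHER" then
              [String.ofList ('#' :: ' ' :: (pyTitleGo p.toList false ++ " Configuration".toList)), ""]
            else [])
        else st.1
      (lines ++ [String.ofList (kv.1.toList ++ '=' :: (PySem.Str.replace kv.2 "\n" "\\n").toList)], some p))
    (lines0, none)
  let lines := if st.2.isSome then st.1 ++ [""] else st.1
  PySem.Str.join "\n" lines

-- ===== PRECONDITION & SPEC =====
def Spec_format_env_py (vars_dict : List (String × String)) (header : Option (List String)) (out : String) : Prop := out = format_env_py_alt vars_dict header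
instance (vars_dict : List (String × String)) (header : Option (List String)) (out : String) : Decidable (Spec_format_env_py vars_dict header out) := by unfold Spec_format_env_py; infer_instance

-- ===== CLAIM (what is proved, stated in full; the proofs are below) =====
def Claim_equal_format_env_py : Prop := ∀ (vars_dict : List (String × String)) (header : Option (List String)), Dom_format_env_py vars_dict header → Spec_format_env_py vars_dict header (format_env_py vars_dict header)

-- ===== LEMMAS AND PROOFS =====

-- proof-side abbreviations
def pvPre (kv : String × String) : String := pyPrefix kv.1

def pvEsc (kv : String × String) : String :=
  String.ofList (kv.1.toList ++ '=' :: (PySem.Str.replace kv.2 "\n" "\\n").toList)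

def pvHdr (p : String) : String :=
  String.ofList ('#' :: ' ' :: (pyTitleGo p.toList false ++ " Configuration".toList))

def pvGl1 (p : String) (g : List (String × String)) : List String :=
  (if p ≠ "OTHER" then [pvHdr p, ""] else []) ++ g.map pvEsc

def pvGlines (p : String) (g : List (String × String)) : List String := pvGl1 p g ++ [""]

def pvLines0 (header : Option (List String)) : List String :=
  match header with
  | some h => if h.isEmpty then [] else h
  | none => []

def pvStepA (g : PySem.Dict String (List (String × String))) (kv : String × String) :
    PySem.Dict String (List (String × String)) :=
  let p := pyPrefix kv.1
  let g := if g.contains p then g else g.insert p []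
  g.modify p [] (fun l => l ++ [kv])

def pvEscStep (lines : List String) (kv : String × String) : List String :=
  let v := if PySem.Str.isIn "\n" kv.2 then PySem.Str.replace kv.2 "\n" "\\n" else kv.2
  lines ++ [String.ofList (kv.1.toList ++ '=' :: v.toList)]

def pvStepALines (lines : List String) (g : String × List (String × String)) : List String :=
  let lines := if g.1 ≠ "OTHER" then
      lines ++ [String.ofList ('#' :: ' ' :: (pyTitleGo g.1.toList false ++ " Configuration".toList))] ++ [""]
    else lines
  let lines := g.2.foldl
    (fun lines kv =>
      let v := if PySem.Str.isIn "\n" kv.2 then PySem.Str.replace kv.2 "\n" "\\n" else kv.2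
      lines ++ [String.ofList (kv.1.toList ++ '=' :: v.toList)]) lines
  lines ++ [""]

def pvStepB (st : List String × Option String) (kv : String × String) :
    List String × Option String :=
  let p := pyPrefix kv.1
  let lines :=
    if some p ≠ st.2 then
      (if st.2.isSome then st.1 ++ [""] else st.1) ++
      (if p ≠ "OTHER" then [pvHdr p, ""] else [])
    else st.1
  (lines ++ [pvEsc kv], some p)

def pvItems (vars_dict : List (String × String)) : List (String × String) :=
  PySem.List.sorted (PySem.Dict.ofList vars_dict).items (fun kv => kv.1)

def pvPs (vars_dict : List (String × String)) : List String :=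
  PySem.List.sorted (PySem.Set.ofList ((pvItems vars_dict).map pvPre)) (fun p => p)

def pvGrp (vars_dict : List (String × String)) (p : String) : List (String × String) :=
  (pvItems vars_dict).filter (fun kv => pvPre kv == p)

-- the two ports, re-expressed with the named step functions (definitional equalities)
theorem pv_A_shape (vars_dict : List (String × String)) (header : Option (List String)) :
    format_env_py vars_dict header =
      PySem.Str.join "\n"
        ((PySem.List.sorted ((pvItems vars_dict).foldl pvStepA PySem.Dict.empty).items
            (fun g => g.1)).foldl pvStepALines (pvLines0 header)) := rfl

theorem pv_B_shape (vars_dict : List (String × String)) (header : Option (List String)) :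
    format_env_py_alt vars_dict header =
      PySem.Str.join "\n"
        (if ((PySem.List.sorted2 (PySem.Dict.ofList vars_dict).items
                (fun kv => pyPrefix kv.1) (fun kv => kv.1)).foldl pvStepB
                (pvLines0 header, none)).2.isSome then
          ((PySem.List.sorted2 (PySem.Dict.ofList vars_dict).items
                (fun kv => pyPrefix kv.1) (fun kv => kv.1)).foldl pvStepB
                (pvLines0 header, none)).1 ++ [""]
        else
          ((PySem.List.sorted2 (PySem.Dict.ofList vars_dict).items
                (fun kv => pyPrefix kv.1) (fun kv => kv.1)).foldl pvStepB
                (pvLines0 header, none)).1) := rfl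

-- no-occurrence replace is the identity
theorem pv_replace_go_id (old new : List Char) :
    ∀ (fuel : Nat) (l acc : List Char), ¬ old <:+: l →
      PySem.Chars.replace.go old new fuel l acc = acc.reverse ++ l := by
  intro fuel
  induction fuel with
  | zero => intro l acc _; rfl
  | succ n ih =>
    intro l acc h
    cases l with
    | nil => simp [PySem.Chars.replace.go]
    | cons c t =>
      rw [PySem.Chars.replace.go]
      have hpre : old.isPrefixOf (c :: t) = false := by
        cases hb : old.isPrefixOf (c :: t)
        · rfl
        · exact absurd ((List.isPrefixOf_iff_prefix.mp hb).isInfix) h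
      rw [if_neg (by simp [hpre])]
      rw [ih t (c :: acc) (fun hi => h (hi.trans (List.suffix_cons c t).isInfix))]
      simp

theorem pv_replace_id (v : String) (h : PySem.Str.isIn "\n" v = false) :
    PySem.Str.replace v "\n" "\\n" = v := by
  have h2 : PySem.Chars.isIn "\n".toList v.toList = false := by
    rw [← PySem.Str.isIn_eq]; exact h
  have hinf : ¬ ("\n".toList <:+: v.toList) := (PySem.Chars.isIn_eq_false_iff _ _).mp h2
  apply String.toList_inj.mp
  rw [PySem.Str.toList_replace]
  unfold PySem.Chars.replace
  rw [if_neg (by simp)]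
  rw [pv_replace_go_id _ _ _ _ _ hinf]
  simp

theorem pv_escStep_eq (lines : List String) (kv : String × String) :
    pvEscStep lines kv = lines ++ [pvEsc kv] := by
  by_cases hn : PySem.Str.isIn "\n" kv.2 = true
  · show lines ++ [String.ofList (kv.1.toList ++ '=' ::
        (if PySem.Str.isIn "\n" kv.2 then PySem.Str.replace kv.2 "\n" "\\n" else kv.2).toList)]
      = _
    rw [if_pos hn]
    rfl
  · show lines ++ [String.ofList (kv.1.toList ++ '=' ::
        (if PySem.Str.isIn "\n" kv.2 then PySem.Str.replace kv.2 "\n" "\\n" else kv.2).toList)]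
      = _
    rw [if_neg hn]
    unfold pvEsc
    rw [pv_replace_id kv.2 (by simpa using hn)]

theorem pv_foldA (g : List (String × String)) :
    ∀ acc, g.foldl pvEscStep acc = acc ++ g.map pvEsc := by
  induction g with
  | nil => intro acc; simp
  | cons kv g ih =>
    intro acc
    rw [List.foldl_cons, pv_escStep_eq, ih]
    simp

theorem pv_stepALines_eq :
    pvStepALines = fun lines g => lines ++ pvGlines g.1 g.2 := by
  funext lines g
  show (g.2.foldl pvEscStep
      (if g.1 ≠ "OTHER" then lines ++ [pvHdr g.1] ++ [""] else lines)) ++ [""]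
    = lines ++ pvGlines g.1 g.2
  rw [pv_foldA]
  by_cases hO : g.1 = "OTHER" <;> simp [pvGlines, pvGl1, pvHdr, hO]

-- sorted2 is sorted under the lexicographic key
theorem pv_sorted2_eq_sorted_lex {α κ₁ κ₂ : Type} [LinearOrder κ₁] [LinearOrder κ₂]
    (xs : List α) (k1 : α → κ₁) (k2 : α → κ₂) :
    PySem.List.sorted2 xs k1 k2 = PySem.List.sorted xs (fun x => toLex (k1 x, k2 x)) := by
  rw [PySem.List.sorted_eq_foldl_insertBy]
  unfold PySem.List.sorted2
  simp only [if_neg (by simp : ¬ (false = true))]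
  congr 1
  funext acc x
  congr 1
  funext a b
  have hlt : (toLex (k1 a, k2 a) < toLex (k1 b, k2 b)) ↔ (k1 a < k1 b ∨ k1 a = k1 b ∧ k2 a < k2 b) := Prod.Lex.lt_iff
  rcases lt_trichotomy (k1 a) (k1 b) with h | h | h
  · simp [h, hlt, not_lt_of_gt h]
  · simp [h, Prod.Lex.lt_iff]
  · simp [hlt, not_lt_of_gt h, h, ne_of_gt h]

theorem pv_count_flatMap {α β : Type} [BEq β] (qs : List α) (f : α → List β) (b : β) :
    (qs.flatMap f).count b = (qs.map (fun q => (f q).count b)).sum := by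
  induction qs with
  | nil => simp
  | cons q qs ih => simp [List.flatMap_cons, List.count_append, ih]

theorem pv_sum_if_mem (qs : List String) (k : String) (c : Nat) (hnd : qs.Nodup) :
    (qs.map (fun q => if k = q then c else 0)).sum = if k ∈ qs then c else 0 := by
  induction qs with
  | nil => simp
  | cons q qs ih =>
    rcases List.nodup_cons.mp hnd with ⟨hq, hnd'⟩
    by_cases hk : k = q
    · subst hk; simp [List.map_cons, ih hnd', hq]
    · simp [List.map_cons, ih hnd', hk, List.mem_cons]

theorem pv_filter_count (l : List (String × String)) (a : String × String) (p : String) :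
    (l.filter (fun kv => pvPre kv == p)).count a
      = if pvPre a = p then l.count a else 0 := by
  by_cases hp : pvPre a = p
  · rw [if_pos hp, List.count_filter (by simp [hp])]
  · rw [if_neg hp, List.count_eq_zero]
    intro hmem
    exact hp (by simpa using (List.mem_filter.mp hmem).2)

-- partitioning a list by its prefixes is a permutation of the list
theorem pv_partition_perm (l : List (String × String)) :
    ((PySem.Set.ofList (l.map pvPre)).flatMap
      (fun p => l.filter (fun kv => pvPre kv == p))).Perm l := by
  rw [List.perm_iff_count]
  intro a
  rw [pv_count_flatMap]
  calc ((PySem.Set.ofList (l.map pvPre)).map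
        (fun q => (l.filter (fun kv => pvPre kv == q)).count a)).sum
      = ((PySem.Set.ofList (l.map pvPre)).map
        (fun q => if pvPre a = q then l.count a else 0)).sum := by
        apply congrArg; exact List.map_congr_left (fun q _ => pv_filter_count l a q)
    _ = if pvPre a ∈ PySem.Set.ofList (l.map pvPre) then l.count a else 0 :=
        pv_sum_if_mem _ _ _ (PySem.Set.nodup_ofList _)
    _ = l.count a := by
        by_cases hmem : a ∈ l
        · rw [if_pos]
          rw [PySem.Set.mem_ofList]
          exact List.mem_map.mpr ⟨a, hmem, rfl⟩
        · rw [List.count_eq_zero.mpr hmem]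
          by_cases h2 : pvPre a ∈ PySem.Set.ofList (l.map pvPre) <;> simp [h2]

theorem pv_pairwise_lt_of_le_nodup (l : List (String × String))
    (h : l.Pairwise (fun a b => a.1 ≤ b.1)) (hnd : (l.map (fun kv => kv.1)).Nodup) :
    l.Pairwise (fun a b => a.1 < b.1) := by
  induction l with
  | nil => simp
  | cons x t ih =>
    rcases List.pairwise_cons.mp h with ⟨hx, ht⟩
    rw [List.map_cons] at hnd
    rcases List.nodup_cons.mp hnd with ⟨hxm, hnd'⟩
    refine List.pairwise_cons.mpr ⟨?_, ih ht hnd'⟩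
    intro b hb
    exact lt_of_le_of_ne (hx b hb) (fun he => hxm (he ▸ List.mem_map.mpr ⟨b, hb, rfl⟩))

theorem pv_flatMap_pairwise (ps : List String) (f : String → List (String × String))
    (hps : ps.Pairwise (· < ·))
    (hin : ∀ p ∈ ps, ∀ kv ∈ f p, pvPre kv = p)
    (hgrp : ∀ p ∈ ps, (f p).Pairwise (fun a b => a.1 < b.1)) :
    (ps.flatMap f).Pairwise
      (fun a b => toLex (pvPre a, a.1) < toLex (pvPre b, b.1)) := by
  induction ps with
  | nil => simp
  | cons p ps ih =>
    rcases List.pairwise_cons.mp hps with ⟨hplt, hps'⟩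
    rw [List.flatMap_cons, List.pairwise_append]
    refine ⟨?_, ih hps' (fun q hq => hin q (List.mem_cons_of_mem _ hq))
        (fun q hq => hgrp q (List.mem_cons_of_mem _ hq)), ?_⟩
    · refine List.Pairwise.imp_of_mem ?_ (hgrp p (List.mem_cons_self ..))
      intro a b ha hb hab
      have hpa := hin p (List.mem_cons_self ..) a ha
      have hpb := hin p (List.mem_cons_self ..) b hb
      rw [Prod.Lex.lt_iff]
      right
      exact ⟨by simp [hpa, hpb], hab⟩
    · intro a ha b hb
      rcases List.mem_flatMap.mp hb with ⟨q, hq, hbq⟩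
      have hpa := hin p (List.mem_cons_self ..) a ha
      have hqb := hin q (List.mem_cons_of_mem _ hq) b hbq
      rw [Prod.Lex.lt_iff]
      left
      simpa [hpa, hqb] using hplt q hq

-- A's grouping loop, characterised
theorem pv_grouped_items (l : List (String × String)) :
    (l.foldl pvStepA PySem.Dict.empty).items =
      (PySem.Set.ofList (l.map pvPre)).map
        (fun p => (p, l.filter (fun kv => pvPre kv == p))) := by
  induction l using List.reverseRecOn with
  | nil => simp [PySem.Set.ofList]; rfl
  | append_singleton t x ih =>
    rw [List.foldl_append]
    set g := t.foldl pvStepA PySem.Dict.empty with hg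
    set S := PySem.Set.ofList (t.map pvPre) with hS
    have hkeys : g.keys = S := by
      simp only [PySem.Dict.keys, ih, List.map_map]
      have hcomp : ((fun (x : String × List (String × String)) => x.1) ∘
          (fun p => (p, t.filter (fun kv => pvPre kv == p)))) = id := rfl
      rw [hcomp, List.map_id]
    have hnodup : g.keys.Nodup := by rw [hkeys]; exact PySem.Set.nodup_ofList _
    have hcont : ∀ q, g.contains q = decide (q ∈ S) := by
      intro q; rw [PySem.Dict.contains_eq_decide_mem_keys, hkeys]
    have hsetS : PySem.Set.ofList ((t ++ [x]).map pvPre) = S.add (pvPre x) := by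
      rw [show (t ++ [x]).map pvPre = t.map pvPre ++ [pvPre x] by simp,
          PySem.Set.ofList_append_singleton]
    have hfilter : ∀ q, (t ++ [x]).filter (fun kv => pvPre kv == q)
        = t.filter (fun kv => pvPre kv == q) ++ (if pvPre x = q then [x] else []) := by
      intro q
      rw [List.filter_append]
      congr 1
      by_cases hq : pvPre x = q <;> simp [hq]
    by_cases hp : pvPre x ∈ S
    · have hc : g.contains (pvPre x) = true := by rw [hcont]; simpa using hp
      have hgd : g.getD (pvPre x) [] = t.filter (fun kv => pvPre kv == pvPre x) := by
        apply PySem.Dict.getD_of_mem_items _ _ hnodup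
        rw [ih]
        exact List.mem_map.mpr ⟨pvPre x, hp, rfl⟩
      have hadd : S.add (pvPre x) = S := by
        simp [PySem.Set.add, PySem.Set.contains]
        exact hp
      rw [hsetS, hadd]
      show (PySem.Dict.modify (if g.contains (pvPre x) then g else _) (pvPre x) []
        (fun l => l ++ [x])).items = _
      rw [if_pos hc]
      simp only [PySem.Dict.modify]
      rw [hgd, PySem.Dict.items_insert_of_contains _ _ hc, ih, List.map_map]
      apply List.map_congr_left
      intro q hq
      by_cases hqp : q = pvPre x
      · subst hqp
        simp [Function.comp, hfilter]
      · simp only [Function.comp_apply]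
        rw [if_neg (by simp [hqp])]
        rw [hfilter q, if_neg (fun hh => hqp hh.symm)]
        simp
    · have hc : g.contains (pvPre x) = false := by rw [hcont]; simpa using hp
      have hadd : S.add (pvPre x) = S ++ [pvPre x] := by
        simp [PySem.Set.add, PySem.Set.contains]
        exact hp
      rw [hsetS, hadd]
      show (PySem.Dict.modify (if g.contains (pvPre x) then g else g.insert (pvPre x) []) (pvPre x) []
        (fun l => l ++ [x])).items = _
      rw [if_neg (by simp [hc])]
      simp only [PySem.Dict.modify]
      rw [PySem.Dict.getD_insert_self]
      have hc2 : (g.insert (pvPre x) []).contains (pvPre x) = true :=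
        PySem.Dict.contains_insert_self _ _ _
      rw [PySem.Dict.items_insert_of_contains _ _ hc2,
          PySem.Dict.items_insert_of_not_contains _ _ hc]
      rw [List.map_append, ih, List.map_map, List.map_append]
      congr 1
      · apply List.map_congr_left
        intro q hq
        have hqp : q ≠ pvPre x := fun he => hp (he ▸ hq)
        simp only [Function.comp_apply]
        rw [if_neg (by simp [hqp])]
        rw [hfilter q, if_neg (fun hh => hqp hh.symm)]
        simp
      · have hFp : t.filter (fun kv => pvPre kv == pvPre x) = [] := by
          rw [List.filter_eq_nil_iff]
          intro kv hkv hbeq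
          have hpk : pvPre kv = pvPre x := by simpa using hbeq
          exact absurd (by rw [hS, PySem.Set.mem_ofList]
                           exact hpk ▸ List.mem_map.mpr ⟨kv, hkv, rfl⟩) hp
        simp [hfilter, hFp]

-- B's single pass over one group
theorem pv_passGroup1 (g : List (String × String)) :
    ∀ (q : String) (lines : List String), (∀ kv ∈ g, pvPre kv = q) →
      g.foldl pvStepB (lines, some q) = (lines ++ g.map pvEsc, some q) := by
  induction g with
  | nil => intro q lines _; simp
  | cons kv g ih =>
    intro q lines hall
    have hq : pvPre kv = q := hall kv (List.mem_cons_self ..)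
    rw [List.foldl_cons]
    have hstep : pvStepB (lines, some q) kv = (lines ++ [pvEsc kv], some q) := by
      unfold pvStepB
      simp only [pvPre] at hq
      simp [hq]
    rw [hstep, ih q (lines ++ [pvEsc kv]) (fun a ha => hall a (List.mem_cons_of_mem _ ha))]
    simp

theorem pv_passGroup (q : String) (lines : List String) (prevOpt : Option String)
    (hne : some q ≠ prevOpt) (g : List (String × String))
    (hgq : ∀ kv ∈ g, pvPre kv = q) (hgne : g ≠ []) :
    g.foldl pvStepB (lines, prevOpt)
      = ((if prevOpt.isSome then lines ++ [""] else lines) ++ pvGl1 q g, some q) := by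
  cases g with
  | nil => exact absurd rfl hgne
  | cons kv g =>
    have hq : pvPre kv = q := hgq kv (List.mem_cons_self ..)
    rw [List.foldl_cons]
    have hstep : pvStepB (lines, prevOpt) kv =
        ((if prevOpt.isSome then lines ++ [""] else lines) ++
          (if q ≠ "OTHER" then [pvHdr q, ""] else []) ++ [pvEsc kv], some q) := by
      unfold pvStepB
      simp only [pvPre] at hq
      simp [hq, hne]
    rw [hstep, pv_passGroup1 g q _ (fun a ha => hgq a (List.mem_cons_of_mem _ ha))]
    simp [pvGl1]

theorem pv_passAll (qs : List String) (f : String → List (String × String))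
    (hnd : qs.Pairwise (· ≠ ·))
    (hf : ∀ q ∈ qs, f q ≠ [] ∧ ∀ kv ∈ f q, pvPre kv = q) :
    ∀ (lines : List String) (prevOpt : Option String), (∀ q ∈ qs, some q ≠ prevOpt) →
      (if ((qs.flatMap f).foldl pvStepB (lines, prevOpt)).2.isSome then
        ((qs.flatMap f).foldl pvStepB (lines, prevOpt)).1 ++ [""]
       else ((qs.flatMap f).foldl pvStepB (lines, prevOpt)).1)
      = (if prevOpt.isSome then lines ++ [""] else lines)
          ++ qs.flatMap (fun q => pvGlines q (f q)) := by
  induction qs with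
  | nil => intro lines prevOpt _; simp
  | cons q qs ih =>
    intro lines prevOpt hprev
    rcases List.pairwise_cons.mp hnd with ⟨hqne, hnd'⟩
    rcases hf q (List.mem_cons_self ..) with ⟨hne0, hq⟩
    rw [List.flatMap_cons]
    simp only [List.foldl_append]
    rw [pv_passGroup q lines prevOpt (hprev q (List.mem_cons_self ..)) (f q) hq hne0]
    have hih := ih hnd' (fun a ha => hf a (List.mem_cons_of_mem _ ha))
      ((if prevOpt.isSome then lines ++ [""] else lines) ++ pvGl1 q (f q)) (some q)
      (fun a ha => by simpa using (hqne a ha).symm)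
    rw [hih]
    simp [pvGlines]

theorem pv_flatMap_map {α β γ : Type} (l : List α) (f : α → β) (g : β → List γ) :
    (l.map f).flatMap g = l.flatMap (fun a => g (f a)) := by
  induction l with
  | nil => rfl
  | cons a l ih => simp [List.flatMap_cons, ih]

theorem pv_main (vars_dict : List (String × String)) (header : Option (List String)) :
    format_env_py vars_dict header = format_env_py_alt vars_dict header := by
  have hkeysnd : ((PySem.Dict.ofList vars_dict).items.map (fun kv => kv.1)).Nodup := by
    have hnk := PySem.Dict.nodup_keys_ofList (κ := String) (ν := String) vars_dict
    simpa [PySem.Dict.keys] using hnk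
  have hitemsperm : (pvItems vars_dict).Perm (PySem.Dict.ofList vars_dict).items :=
    PySem.List.sorted_perm _ _ false
  have hitemsnd : ((pvItems vars_dict).map (fun kv => kv.1)).Nodup :=
    ((hitemsperm.map _).nodup_iff).mpr hkeysnd
  have hps : (pvPs vars_dict).Pairwise (· < ·) :=
    PySem.List.sorted_ofList_pairwise_lt _
  have hin : ∀ p ∈ pvPs vars_dict, ∀ kv ∈ pvGrp vars_dict p, pvPre kv = p := by
    intro p _ kv hkv
    simpa using (List.mem_filter.mp hkv).2
  have hgrp : ∀ p ∈ pvPs vars_dict, (pvGrp vars_dict p).Pairwise (fun a b => a.1 < b.1) := by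
    intro p _
    exact List.Pairwise.sublist List.filter_sublist
      (pv_pairwise_lt_of_le_nodup _ (PySem.List.sorted_pairwise _ _) hitemsnd)
  have hnonempty : ∀ p ∈ pvPs vars_dict, pvGrp vars_dict p ≠ [] := by
    intro p hp
    have hpmem : p ∈ (pvItems vars_dict).map pvPre := by
      have hms : p ∈ PySem.Set.ofList ((pvItems vars_dict).map pvPre) := by
        exact (PySem.List.mem_sorted _ _ false p).mp hp
      exact (PySem.Set.mem_ofList _ _).mp hms
    rcases List.mem_map.mp hpmem with ⟨kv, hkv, hpre⟩
    have hmem : kv ∈ pvGrp vars_dict p := List.mem_filter.mpr ⟨hkv, by simp [hpre]⟩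
    exact List.ne_nil_of_mem hmem
  have hsortedgrp : PySem.List.sorted
      ((pvItems vars_dict).foldl pvStepA PySem.Dict.empty).items (fun g => g.1)
      = (pvPs vars_dict).map (fun p => (p, pvGrp vars_dict p)) := by
    apply PySem.List.sorted_eq_of_perm_of_pairwise_lt
    · rw [pv_grouped_items]
      exact (PySem.List.sorted_perm _ _ false).map _
    · rw [List.pairwise_map]
      exact hps
  have hflat : PySem.List.sorted (PySem.Dict.ofList vars_dict).items
      (fun x => toLex ((fun kv : String × String => pyPrefix kv.1) x,
        (fun kv : String × String => kv.1) x))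
      = (pvPs vars_dict).flatMap (pvGrp vars_dict) := by
    apply PySem.List.sorted_eq_of_perm_of_pairwise_lt
    · exact (((PySem.List.sorted_perm _ _ false).flatMap
        (fun a _ => List.Perm.refl _)).trans
          (pv_partition_perm (pvItems vars_dict))).trans hitemsperm
    · have hpw := pv_flatMap_pairwise (pvPs vars_dict) (pvGrp vars_dict) hps hin hgrp
      simpa [pvPre] using hpw
  have hpass := pv_passAll (pvPs vars_dict) (pvGrp vars_dict)
      (hps.imp (fun hlt => ne_of_lt hlt)) (fun q hq => ⟨hnonempty q hq, hin q hq⟩)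
      (pvLines0 header) none (fun q _ => by simp)
  rw [pv_A_shape, pv_B_shape, pv_stepALines_eq, hsortedgrp,
      PySem.List.foldl_append_eq_flatMap, pv_flatMap_map,
      pv_sorted2_eq_sorted_lex, hflat, hpass]
  simp [pvGlines]

-- ===== VERDICT (by name: the statement is the Claim_ definition above) =====
theorem format_env_py_spec : Claim_equal_format_env_py := by
  intro vars_dict header _
  exact pv_main vars_dict header
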